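-- pv_equiv track=rewrite | github.com/Akshat7274/CipherLock | Application/Ciphers/Hill.py | codeword
-- ===== SOURCE A (Python) =====
-- def codeword(txt,sz):
--     fin = []
--     spl = []
--     if (int(len(txt)%sz)!=0):
--         txt += "X"*(int(sz)-int(len(txt)%sz))
--     for i in txt:
--         spl.append([i])
--         if (len(spl)==sz):
--             fin.append(spl)
--             spl = []
--     return fin
-- ===== SOURCE B (Python) =====
-- def codeword(txt, sz):
--     # Same padding as A, then chunk boundaries computed up front with slicing
--     # instead of accumulating into a buffer that flushes at size sz.
--     if int(len(txt) % sz) != 0: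
--         txt += "X" * (int(sz) - int(len(txt) % sz))
--     step = int(sz)
--     return [[[c] for c in txt[i:i + step]] for i in range(0, len(txt), step)]
-- ===== Notes on version B (the rewrite author's own statement) =====
-- stated objective: simpler
-- what changed: Replaces A's character-by-character flush-buffer accumulation with slicing: chunk start indices are computed up front via range(0, len, sz) and each chunk is a slice comprehension.
import Mathlib
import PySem

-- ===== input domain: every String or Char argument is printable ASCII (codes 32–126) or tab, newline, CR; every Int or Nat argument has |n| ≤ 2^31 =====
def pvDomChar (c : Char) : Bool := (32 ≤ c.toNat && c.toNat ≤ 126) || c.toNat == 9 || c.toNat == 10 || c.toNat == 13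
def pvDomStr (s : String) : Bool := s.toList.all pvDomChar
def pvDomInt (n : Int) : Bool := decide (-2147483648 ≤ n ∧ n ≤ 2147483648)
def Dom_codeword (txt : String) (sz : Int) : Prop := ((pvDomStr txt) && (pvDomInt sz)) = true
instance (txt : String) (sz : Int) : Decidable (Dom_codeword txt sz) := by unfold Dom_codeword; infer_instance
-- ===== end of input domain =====

-- B replaces A's flush-buffer accumulation with up-front chunk boundaries and slicing (simpler decomposition, same cost).
-- ===== PORT A =====
-- A's loop body: append [i] to the buffer, flush when the buffer reaches size sz
def stepA (sz : Int) (st : List (List (List String)) × List (List String)) (i : Char) :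
    List (List (List String)) × List (List String) :=
  let spl := st.2 ++ [[String.ofList [i]]]
  if (spl.length : Int) = sz then (st.1 ++ [spl], []) else (st.1, spl)

def codeword (txt : String) (sz : Int) : List (List (List String)) :=
  let cs := txt.toList
  let cs := if PySem.Int.mod (cs.length : Int) sz ≠ 0
    then cs ++ List.replicate (sz - PySem.Int.mod (cs.length : Int) sz).toNat 'X'
    else cs
  (cs.foldl (stepA sz) ([], [])).1

-- ===== PORT B =====
def codeword_alt (txt : String) (sz : Int) : List (List (List String)) :=
  let cs := txt.toList
  let cs := if PySem.Int.mod (cs.length : Int) sz ≠ 0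
    then cs ++ List.replicate (sz - PySem.Int.mod (cs.length : Int) sz).toNat 'X'
    else cs
  (PySem.List.pyRange 0 (cs.length : Int) sz).map
    (fun i => (PySem.List.slice cs (some i) (some (i + sz))).map (fun c => [String.ofList [c]]))

-- ===== PRECONDITION & SPEC =====
-- Pre_ excludes exactly sz = 0, where Python A raises ZeroDivisionError at len(txt) % sz.
def Pre_codeword (txt : String) (sz : Int) : Prop := sz ≠ 0
instance (txt : String) (sz : Int) : Decidable (Pre_codeword txt sz) := by unfold Pre_codeword; infer_instance
def pvWitness_codeword : String × Int := ("HELLO", 2)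

def Spec_codeword (txt : String) (sz : Int) (out : List (List (List String))) : Prop := out = codeword_alt txt sz
instance (txt : String) (sz : Int) (out : List (List (List String))) : Decidable (Spec_codeword txt sz out) := by unfold Spec_codeword; infer_instance

-- ===== CLAIM (what is proved, stated in full; the proofs are below) =====
def Claim_equal_codeword : Prop := ∀ (txt : String) (sz : Int), Dom_codeword txt sz → Pre_codeword txt sz → Spec_codeword txt sz (codeword txt sz)

-- ===== LEMMAS AND PROOFS =====

-- A's fold never flushes when sz < 0 (the buffer length is a nonnegative count)
theorem fold_neg (sz : Int) (hsz : sz < 0) :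
    ∀ (l : List Char) (acc : List (List (List String))) (spl : List (List String)),
    (l.foldl (stepA sz) (acc, spl)).1 = acc := by
  intro l
  induction l with
  | nil => intro acc spl; rfl
  | cons c t ih =>
      intro acc spl
      simp only [List.foldl_cons, stepA]
      rw [if_neg (by push_cast [List.length_append]; omega)]
      exact ih acc _

-- B's range is empty when sz < 0 (stop = length ≥ 0 = start)
theorem pyRange_neg_empty (m sz : Int) (hm : 0 ≤ m) (hsz : sz < 0) :
    PySem.List.pyRange 0 m sz = [] := by
  simp only [PySem.List.pyRange]
  rw [if_neg (by omega)]
  simp only [if_neg (by omega : ¬ 0 < sz), if_neg (by omega : ¬ m < 0)]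
  rfl

-- one full chunk: starting from buffer spl, consuming c completes it and flushes once
theorem fold_chunk (n : Nat) :
    ∀ (c : List Char) (spl : List (List String)) (acc : List (List (List String))),
    spl.length + c.length = n → c ≠ [] →
    (c.foldl (stepA (n : Int)) (acc, spl)) =
      (acc ++ [spl ++ c.map (fun ch => [String.ofList [ch]])], []) := by
  intro c
  induction c with
  | nil => intro spl acc _ hne; exact absurd rfl hne
  | cons ch t ih =>
      intro spl acc hlen _
      simp only [List.foldl_cons, stepA]
      cases t with
      | nil =>
          rw [if_pos (by push_cast [List.length_append]; simp at hlen ⊢; omega)]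
          simp
      | cons c' t' =>
          rw [if_neg (by push_cast [List.length_append]; simp at hlen ⊢; omega)]
          rw [ih (spl ++ [[String.ofList [ch]]]) acc (by simp at hlen ⊢; omega) (by simp)]
          simp

-- A's fold on a list of length n*k produces the k chunks
theorem fold_chunks (n : Nat) (hn : 0 < n) :
    ∀ (k : Nat) (l : List Char) (acc : List (List (List String))),
    l.length = n * k →
    (l.foldl (stepA (n : Int)) (acc, [])) =
      (acc ++ (List.range k).map
        (fun j => ((l.drop (n * j)).take n).map (fun ch => [String.ofList [ch]])), []) := by
  intro k
  induction k with
  | zero =>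
      intro l acc hl
      have : l = [] := List.eq_nil_of_length_eq_zero (by omega)
      subst this; simp
  | succ k ih =>
      intro l acc hl
      have hle : n ≤ l.length := by
        rw [hl]; exact Nat.le_mul_of_pos_right n (Nat.succ_pos k)
      have htake : (l.take n).length = n := by
        rw [List.length_take]; omega
      have hdrop : (l.drop n).length = n * k := by
        rw [List.length_drop, hl, Nat.mul_succ]; omega
      have hsplit := (List.take_append_drop n l).symm
      conv_lhs => rw [hsplit]
      rw [List.foldl_append,
        fold_chunk n (l.take n) [] acc (by rw [List.length_nil, Nat.zero_add]; exact htake)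
          (List.ne_nil_of_length_pos (by rw [htake]; exact hn)),
        ih (l.drop n) _ hdrop]
      rw [List.range_succ_eq_map, List.map_cons, List.map_map]
      have hrest : (List.range k).map
          (fun j => (((l.drop n).drop (n * j)).take n).map (fun ch => [String.ofList [ch]]))
          = (List.range k).map
            ((fun j => ((l.drop (n * j)).take n).map (fun ch => [String.ofList [ch]])) ∘ Nat.succ) := by
        apply List.map_congr_left
        intro j _
        simp only [Function.comp, List.drop_drop]
        congr 3
        simp [Nat.succ_eq_add_one]
        ring
      rw [hrest]
      simp

-- B's range-and-slice list is the same k chunks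
theorem slice_chunks (n : Nat) (hn : 0 < n) (k : Nat) (l : List Char) (hl : l.length = n * k) :
    (PySem.List.pyRange 0 (l.length : Int) (n : Int)).map
      (fun i => (PySem.List.slice l (some i) (some (i + (n : Int)))).map (fun c => [String.ofList [c]])) =
    (List.range k).map (fun j => ((l.drop (n * j)).take n).map (fun ch => [String.ofList [ch]])) := by
  rw [PySem.List.pyRange_of_pos _ _ (by exact_mod_cast hn)]
  have hcount : (if (0:Int) < (l.length : Int) then (((l.length : Int) - 0 + n - 1) / n).toNat else 0) = k := by
    rcases Nat.eq_zero_or_pos k with hk | hk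
    · subst hk
      rw [if_neg (by simp [hl])]
    · have hlpos : 0 < l.length := hl ▸ Nat.mul_pos hn hk
      rw [if_pos (by exact_mod_cast hlpos)]
      have h1 : ((l.length : Int) - 0 + n - 1) = ((n:Int) - 1) + (n:Int) * k := by push_cast [hl]; ring
      rw [h1, Int.add_mul_ediv_left _ _ (by omega : (n:Int) ≠ 0),
        Int.ediv_eq_zero_of_lt (by omega) (by omega)]
      simp
  rw [hcount, List.map_map]
  apply List.map_congr_left
  intro j _
  have hcast : (0:Int) + (n:Int) * (j:Int) = ((n * j : Nat) : Int) := by push_cast; ring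
  simp only [Function.comp, hcast]
  rw [PySem.List.slice_natCast_add]

-- the padded length is a multiple of sz (for sz > 0)
theorem padded_dvd (L : Nat) (sz : Int) (hsz : 0 < sz) :
    sz ∣ (((L + (sz - PySem.Int.mod (L : Int) sz).toNat : Nat) : Int)) := by
  rw [PySem.Int.mod_eq_emod_of_pos hsz]
  have h0 : 0 ≤ (L : Int) % sz := Int.emod_nonneg _ (by omega)
  have h1 : (L : Int) % sz < sz := Int.emod_lt_of_pos _ hsz
  have h2 : (((sz - (L : Int) % sz).toNat : Nat) : Int) = sz - (L : Int) % sz :=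
    Int.toNat_of_nonneg (by omega)
  push_cast
  rw [h2]
  exact ⟨(L : Int) / sz + 1, by rw [Int.emod_def]; ring⟩

-- ===== VERDICT (by name: the statement is the Claim_ definition above) =====
theorem codeword_spec : Claim_equal_codeword := by
  intro txt sz _ hsz
  unfold Spec_codeword codeword codeword_alt
  simp only []
  set cs := (if PySem.Int.mod ((txt.toList.length : Int)) sz ≠ 0
    then txt.toList ++ List.replicate (sz - PySem.Int.mod ((txt.toList.length : Int)) sz).toNat 'X'
    else txt.toList) with hcs
  rcases lt_or_gt_of_ne hsz with hneg | hpos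
  · rw [fold_neg sz hneg, pyRange_neg_empty _ _ (by positivity) hneg]
    simp
  · -- sz > 0
    have hszn : sz = ((sz.toNat : Nat) : Int) := (Int.toNat_of_nonneg (by omega)).symm
    set n := sz.toNat with hn
    have hnpos : 0 < n := by omega
    have hdvd : (sz : Int) ∣ (cs.length : Int) := by
      rw [hcs]
      split_ifs with h
      · rw [List.length_append, List.length_replicate]
        exact padded_dvd _ _ hpos
      · rw [not_not, PySem.Int.mod_eq_emod_of_pos hpos] at h
        exact Int.dvd_of_emod_eq_zero h
    have hdvdn : n ∣ cs.length := by
      rw [hszn] at hdvd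
      exact_mod_cast hdvd
    obtain ⟨k, hk⟩ := hdvdn
    rw [hszn]
    rw [fold_chunks n hnpos k cs [] hk, slice_chunks n hnpos k cs hk]
    simp
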